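-- pv_equiv track=rewrite | github.com/lgtm-bro/forage-walmart-etl | merge_data.py | aggregate_shipments
-- ===== SOURCE A (Python) =====
-- def aggregate_shipments(data):
--     """Takes a hash map of tuples and returns a hash map of shipments
--        with items in the same shipment aggregated into one entry
--     params: dict of items shipped
--     return: dict with shipment id as key and dict of products in shipment with their qnty as a value
--     """
--
--     shipments = {}
--     for s in data.values():
--         order = s[0][1]
--         product = s[1][1]
--         if shipments.get(order):
--             if shipments[order].get(product):
--                 shipments[order][product] += 1
--             else:
--                 shipments[order][product] = 1
--         else:
--             shipments[order] = {product: 1}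
--
--     return shipments
-- ===== SOURCE B (Python) =====
-- def aggregate_shipments(data):
--     """Count (order, product) pairs flat in one pass, then regroup the counter
--        into the nested dict in a second pass (two-phase count-then-regroup)."""
--     pairs = [(s[0][1], s[1][1]) for s in data.values()]
--     counts = {}
--     for p in pairs:
--         counts[p] = counts.get(p, 0) + 1
--     result = {}
--     for (order, product), cnt in counts.items():
--         if order not in result:
--             result[order] = {}
--         result[order][product] = cnt
--     return result
-- ===== Notes on version B (the rewrite author's own statement) =====
-- stated objective: alternative
-- what changed: A builds the nested order->product->count dict incrementally inside one interleaved loop with truthiness-guarded branching; B first flattens data.values() into (order, product) pairs and counts them in a flat counter dict, then regroups the counter items into the nested dict in a separate second pass.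
import Mathlib
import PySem

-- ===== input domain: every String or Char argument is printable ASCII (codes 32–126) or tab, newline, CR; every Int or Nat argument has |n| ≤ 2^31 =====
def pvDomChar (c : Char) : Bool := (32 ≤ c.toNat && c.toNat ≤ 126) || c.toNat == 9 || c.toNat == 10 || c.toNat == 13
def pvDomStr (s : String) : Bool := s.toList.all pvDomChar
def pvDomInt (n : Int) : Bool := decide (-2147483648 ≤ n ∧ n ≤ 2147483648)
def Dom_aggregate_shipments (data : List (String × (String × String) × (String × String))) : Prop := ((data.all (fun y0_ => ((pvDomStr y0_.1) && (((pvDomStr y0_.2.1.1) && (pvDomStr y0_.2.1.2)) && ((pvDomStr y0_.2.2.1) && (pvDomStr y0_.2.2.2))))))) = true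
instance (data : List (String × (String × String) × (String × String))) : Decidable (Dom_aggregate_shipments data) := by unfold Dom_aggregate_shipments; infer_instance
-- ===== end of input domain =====

-- B replaces A's interleaved nested-dict build with a two-phase count-then-regroup
-- (flat (order, product) counter first, nested dict second); objective: alternative
-- decomposition, same asymptotic cost.

-- ===== PORT A =====
-- A's single loop over data.values(), building the nested dict incrementally.
-- Python truthiness is ported exactly: 'if shipments.get(order):' is none-or-empty-dict,
-- 'if shipments[order].get(product):' is none-or-zero-count.
def aggregate_shipments (data : List (String × (String × String) × (String × String))) :
    List (String × List (String × Int)) :=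
  let shipments := ((PySem.Dict.ofList data).values).foldl
    (fun (sh : PySem.Dict String (PySem.Dict String Int)) s =>
      let order := s.1.2
      let product := s.2.2
      match sh.get? order with
      | some inner =>
          if inner.items ≠ [] then
            match inner.get? product with
            | some c =>
                if c ≠ 0 then sh.insert order (inner.insert product (c + 1))
                else sh.insert order (inner.insert product 1)
            | none => sh.insert order (inner.insert product 1)
          else sh.insert order (PySem.Dict.ofList [(product, (1 : Int))])
      | none => sh.insert order (PySem.Dict.ofList [(product, (1 : Int))])) PySem.Dict.empty
  shipments.items.map (fun p => (p.1, p.2.items))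

-- ===== PORT B =====
-- B: extract the flat (order, product) pair list, count pairs into one flat counter,
-- then regroup the counter's items into the nested dict in a second pass.
def aggregate_shipments_alt (data : List (String × (String × String) × (String × String))) :
    List (String × List (String × Int)) :=
  let pairs := ((PySem.Dict.ofList data).values).map (fun s => (s.1.2, s.2.2))
  let counts := pairs.foldl
    (fun (c : PySem.Dict (String × String) Int) p => c.insert p (c.getD p 0 + 1)) PySem.Dict.empty
  let result := counts.items.foldl
    (fun (r : PySem.Dict String (PySem.Dict String Int)) pc =>
      let r1 := if r.contains pc.1.1 then r else r.insert pc.1.1 PySem.Dict.empty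
      r1.insert pc.1.1 ((r1.getD pc.1.1 PySem.Dict.empty).insert pc.1.2 pc.2)) PySem.Dict.empty
  result.items.map (fun p => (p.1, p.2.items))

-- ===== PRECONDITION & SPEC =====
def Spec_aggregate_shipments (data : List (String × (String × String) × (String × String))) (out : List (String × List (String × Int))) : Prop := out = aggregate_shipments_alt data
instance (data : List (String × (String × String) × (String × String))) (out : List (String × List (String × Int))) : Decidable (Spec_aggregate_shipments data out) := by unfold Spec_aggregate_shipments; infer_instance

-- ===== CLAIM (what is proved, stated in full; the proofs are below) =====
def Claim_equal_aggregate_shipments : Prop := ∀ (data : List (String × (String × String) × (String × String))), Dom_aggregate_shipments data → Spec_aggregate_shipments data (aggregate_shipments data)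

-- ===== LEMMAS AND PROOFS =====

-- A's loop body over an extracted (order, product) pair.
def stepA (sh : PySem.Dict String (PySem.Dict String Int)) (p : String × String) :
    PySem.Dict String (PySem.Dict String Int) :=
  match sh.get? p.1 with
  | some inner =>
      if inner.items ≠ [] then
        match inner.get? p.2 with
        | some c =>
            if c ≠ 0 then sh.insert p.1 (inner.insert p.2 (c + 1))
            else sh.insert p.1 (inner.insert p.2 1)
        | none => sh.insert p.1 (inner.insert p.2 1)
      else sh.insert p.1 (PySem.Dict.ofList [(p.2, (1 : Int))])
  | none => sh.insert p.1 (PySem.Dict.ofList [(p.2, (1 : Int))])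

-- B's regroup loop body over one counter item.
def stepB (r : PySem.Dict String (PySem.Dict String Int)) (pc : (String × String) × Int) :
    PySem.Dict String (PySem.Dict String Int) :=
  let r1 := if r.contains pc.1.1 then r else r.insert pc.1.1 PySem.Dict.empty
  r1.insert pc.1.1 ((r1.getD pc.1.1 PySem.Dict.empty).insert pc.1.2 pc.2)

-- canonical inner item list of a pair list: first-seen products of order o, with counts
def innerOf (ps : List (String × String)) (o : String) : List (String × Int) :=
  ((PySem.Set.ofList ps).filter (fun q => q.1 == o)).map (fun q => (q.2, (ps.count q : Int)))

-- canonical outer item list: first-seen orders with their inner dicts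
def outerOf (ps : List (String × String)) : List (String × PySem.Dict String Int) :=
  (PySem.Set.ofList (ps.map Prod.fst)).map (fun o => (o, PySem.Dict.mk (innerOf ps o)))

theorem ofList_append_mem {α : Type} [BEq α] [LawfulBEq α] (l : List α) (a : α) (h : a ∈ l) :
    PySem.Set.ofList (l ++ [a]) = PySem.Set.ofList l := by
  rw [PySem.Set.ofList_eq_foldl, PySem.Set.ofList_eq_foldl, List.foldl_append]
  simp only [List.foldl_cons, List.foldl_nil, PySem.Set.add, PySem.Set.contains]
  rw [← PySem.Set.ofList_eq_foldl]
  simp [PySem.Set.mem_ofList, h]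

theorem ofList_append_not_mem {α : Type} [BEq α] [LawfulBEq α] (l : List α) (a : α) (h : a ∉ l) :
    PySem.Set.ofList (l ++ [a]) = PySem.Set.ofList l ++ [a] := by
  rw [PySem.Set.ofList_eq_foldl, PySem.Set.ofList_eq_foldl, List.foldl_append]
  simp only [List.foldl_cons, List.foldl_nil, PySem.Set.add, PySem.Set.contains]
  rw [← PySem.Set.ofList_eq_foldl]
  simp [PySem.Set.mem_ofList, h]

theorem mem_of_mem_filter_set (ps : List (String × String)) (o : String) (q : String × String)
    (h : q ∈ (PySem.Set.ofList ps).filter (fun q => q.1 == o)) : q ∈ ps ∧ q.1 = o := by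
  rcases List.mem_filter.1 h with ⟨h1, h2⟩
  exact ⟨(PySem.Set.mem_ofList ps q).1 h1, by simpa using h2⟩

theorem innerOf_append_of_ne (ps : List (String × String)) (p : String × String) (o' : String)
    (h : p.1 ≠ o') : innerOf (ps ++ [p]) o' = innerOf ps o' := by
  unfold innerOf
  by_cases hp : p ∈ ps
  · rw [ofList_append_mem ps p hp]
    refine List.map_congr_left (fun q hq => ?_)
    rcases mem_of_mem_filter_set ps o' q hq with ⟨hq1, hq2⟩
    have hqp : q ≠ p := fun e => h (by rw [← e, hq2])
    have hc0 : List.count q [p] = 0 := List.count_eq_zero.2 (by simpa using hqp)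
    rw [List.count_append, hc0, Nat.add_zero]
  · rw [ofList_append_not_mem ps p hp, List.filter_append]
    have : [p].filter (fun q => q.1 == o') = [] := by simp [h]
    rw [this, List.append_nil]
    refine List.map_congr_left (fun q hq => ?_)
    rcases mem_of_mem_filter_set ps o' q hq with ⟨hq1, hq2⟩
    have hqp : q ≠ p := fun e => h (by rw [← e, hq2])
    have hc0 : List.count q [p] = 0 := List.count_eq_zero.2 (by simpa using hqp)
    rw [List.count_append, hc0, Nat.add_zero]

theorem innerOf_append_self_of_not_mem (ps : List (String × String)) (p : String × String)
    (hp : p ∉ ps) :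
    innerOf (ps ++ [p]) p.1 = innerOf ps p.1 ++ [(p.2, 1)] := by
  unfold innerOf
  rw [ofList_append_not_mem ps p hp, List.filter_append, List.map_append]
  have h1 : [p].filter (fun q => q.1 == p.1) = [p] := by simp
  rw [h1]
  congr 1
  · refine List.map_congr_left (fun q hq => ?_)
    rcases mem_of_mem_filter_set ps p.1 q hq with ⟨hq1, hq2⟩
    have hqp : q ≠ p := fun e => hp (e ▸ hq1)
    have hc0 : List.count q [p] = 0 := List.count_eq_zero.2 (by simpa using hqp)
    rw [List.count_append, hc0, Nat.add_zero]
  · simp [List.count_append, List.count_eq_zero.2 hp]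

theorem innerOf_append_self_of_mem (ps : List (String × String)) (p : String × String)
    (hp : p ∈ ps) :
    innerOf (ps ++ [p]) p.1 =
      (innerOf ps p.1).map
        (fun e => if e.1 == p.2 then (p.2, (ps.count p : Int) + 1) else e) := by
  unfold innerOf
  rw [ofList_append_mem ps p hp, List.map_map]
  refine List.map_congr_left (fun q hq => ?_)
  rcases mem_of_mem_filter_set ps p.1 q hq with ⟨hq1, hq2⟩
  by_cases hqp : q = p
  · subst hqp
    simp [List.count_append]
  · have h2 : q.2 ≠ p.2 := fun e => hqp (Prod.ext (hq2.trans rfl) e)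
    have hc0 : List.count q [p] = 0 := List.count_eq_zero.2 (by simpa using hqp)
    simp only [List.count_append, hc0, Nat.add_zero]
    simp [h2]

theorem keys_outerOf (ps : List (String × String)) :
    (outerOf ps).map Prod.fst = PySem.Set.ofList (ps.map Prod.fst) := by
  simp [outerOf, List.map_map, Function.comp_def]

-- A's loop, characterized: it builds exactly the canonical grouped item lists.
theorem AChar (ps : List (String × String)) :
    (List.foldl stepA PySem.Dict.empty ps).items = outerOf ps := by
  induction ps using List.reverseRecOn with
  | nil => rfl
  | append_singleton ps p ih =>
    rw [List.foldl_append, List.foldl_cons, List.foldl_nil]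
    have hd : List.foldl stepA PySem.Dict.empty ps = PySem.Dict.mk (outerOf ps) :=
      PySem.Dict.ext ih
    rw [hd]
    have hndk : (PySem.Dict.mk (outerOf ps)).keys.Nodup := by
      show ((outerOf ps).map Prod.fst).Nodup
      rw [keys_outerOf]; exact PySem.Set.nodup_ofList _
    by_cases ho : p.1 ∈ ps.map Prod.fst
    · -- order already present
      have hmem : (p.1, PySem.Dict.mk (innerOf ps p.1)) ∈ (PySem.Dict.mk (outerOf ps)).items := by
        show _ ∈ outerOf ps
        exact List.mem_map_of_mem ((PySem.Set.mem_ofList _ _).2 ho)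
      have hget : (PySem.Dict.mk (outerOf ps)).get? p.1 = some (PySem.Dict.mk (innerOf ps p.1)) :=
        PySem.Dict.get?_of_mem_items _ hmem hndk
      have hcon : (PySem.Dict.mk (outerOf ps)).contains p.1 = true := by
        rw [PySem.Dict.contains_eq_isSome_get?, hget]; rfl
      have hne_nil : innerOf ps p.1 ≠ [] := by
        obtain ⟨q, hqm, hq1⟩ := List.mem_map.1 ho
        intro hnil
        have hqf : q ∈ (PySem.Set.ofList ps).filter (fun q => q.1 == p.1) :=
          List.mem_filter.2 ⟨(PySem.Set.mem_ofList ps q).2 hqm, by simp [hq1]⟩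
        have hm2 : (q.2, (ps.count q : Int)) ∈ innerOf ps p.1 := List.mem_map_of_mem hqf
        rw [hnil] at hm2
        exact (List.not_mem_nil).elim hm2
      have hfilter_nd : ((PySem.Set.ofList ps).filter (fun q => q.1 == p.1)).Nodup :=
        (PySem.Set.nodup_ofList ps).filter _
      have hinner_nd : (PySem.Dict.mk (innerOf ps p.1)).keys.Nodup := by
        show ((innerOf ps p.1).map Prod.fst).Nodup
        rw [innerOf, List.map_map]
        simp only [Function.comp_def]
        refine List.Nodup.map_on ?_ hfilter_nd
        intro x hx y hy e
        rcases mem_of_mem_filter_set _ _ _ hx with ⟨_, hx2⟩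
        rcases mem_of_mem_filter_set _ _ _ hy with ⟨_, hy2⟩
        exact Prod.ext (hx2.trans hy2.symm) e
      show (stepA (PySem.Dict.mk (outerOf ps)) p).items = _
      simp only [stepA, hget]
      rw [if_pos (show (PySem.Dict.mk (innerOf ps p.1)).items ≠ [] from hne_nil)]
      by_cases hpp : p ∈ ps
      · -- pair already seen: in-place increment
        have hin_mem : (p.2, (ps.count p : Int)) ∈ (PySem.Dict.mk (innerOf ps p.1)).items := by
          show _ ∈ innerOf ps p.1
          exact List.mem_map_of_mem
            (List.mem_filter.2 ⟨(PySem.Set.mem_ofList ps p).2 hpp, by simp⟩)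
        have hget2 : (PySem.Dict.mk (innerOf ps p.1)).get? p.2 = some (ps.count p : Int) :=
          PySem.Dict.get?_of_mem_items _ hin_mem hinner_nd
        have hcon2 : (PySem.Dict.mk (innerOf ps p.1)).contains p.2 = true := by
          rw [PySem.Dict.contains_eq_isSome_get?, hget2]; rfl
        have hc0 : (ps.count p : Int) ≠ 0 :=
          Int.natCast_ne_zero.2 (fun h => (List.count_eq_zero.1 h) hpp)
        simp only [hget2]
        rw [if_pos hc0]
        rw [PySem.Dict.items_insert_of_contains _ _ hcon]
        unfold outerOf
        rw [List.map_append, List.map_cons, List.map_nil, ofList_append_mem _ _ ho, List.map_map]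
        refine List.map_congr_left (fun o' ho' => ?_)
        by_cases he : o' = p.1
        · subst he
          simp only [Function.comp_def, beq_self_eq_true, if_pos]
          refine Prod.ext rfl (PySem.Dict.ext ?_)
          rw [PySem.Dict.items_insert_of_contains _ _ hcon2]
          show _ = innerOf (ps ++ [p]) p.1
          rw [innerOf_append_self_of_mem ps p hpp]
        · simp only [Function.comp_def]
          rw [if_neg (by simpa using he)]
          rw [innerOf_append_of_ne ps p o' (fun e => he (e.symm))]
      · -- order seen, product new for this order
        have hget2 : (PySem.Dict.mk (innerOf ps p.1)).get? p.2 = none := by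
          rw [PySem.Dict.get?_eq_none_iff_not_mem_keys]
          show p.2 ∉ (innerOf ps p.1).map Prod.fst
          intro hmem2
          rw [innerOf, List.map_map] at hmem2
          obtain ⟨q, hqf, hq2⟩ := List.mem_map.1 hmem2
          rcases mem_of_mem_filter_set _ _ _ hqf with ⟨hq1, hq1'⟩
          exact hpp (show p ∈ ps from (Prod.ext hq1' (by simpa using hq2)) ▸ hq1)
        have hcon2 : (PySem.Dict.mk (innerOf ps p.1)).contains p.2 = false := by
          rw [PySem.Dict.contains_eq_isSome_get?, hget2]; rfl
        simp only [hget2]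
        rw [PySem.Dict.items_insert_of_contains _ _ hcon]
        unfold outerOf
        rw [List.map_append, List.map_cons, List.map_nil, ofList_append_mem _ _ ho, List.map_map]
        refine List.map_congr_left (fun o' ho' => ?_)
        by_cases he : o' = p.1
        · subst he
          simp only [Function.comp_def, beq_self_eq_true, if_pos]
          refine Prod.ext rfl (PySem.Dict.ext ?_)
          rw [PySem.Dict.items_insert_of_not_contains _ _ hcon2]
          show innerOf ps p.1 ++ [(p.2, 1)] = innerOf (ps ++ [p]) p.1
          rw [innerOf_append_self_of_not_mem ps p hpp]
        · simp only [Function.comp_def]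
          rw [if_neg (by simpa using he)]
          rw [innerOf_append_of_ne ps p o' (fun e => he (e.symm))]
    · -- fresh order
      have hp : p ∉ ps := fun h => ho (List.mem_map_of_mem h)
      have hget : (PySem.Dict.mk (outerOf ps)).get? p.1 = none := by
        rw [PySem.Dict.get?_eq_none_iff_not_mem_keys]
        show p.1 ∉ (outerOf ps).map Prod.fst
        rw [keys_outerOf]
        simpa [PySem.Set.mem_ofList] using ho
      have hcon : (PySem.Dict.mk (outerOf ps)).contains p.1 = false := by
        rw [PySem.Dict.contains_eq_isSome_get?, hget]; rfl
      show (stepA (PySem.Dict.mk (outerOf ps)) p).items = _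
      simp only [stepA, hget]
      rw [PySem.Dict.items_insert_of_not_contains _ _ hcon]
      have hinner_nil : innerOf ps p.1 = [] := by
        rw [innerOf, List.filter_eq_nil_iff.2, List.map_nil]
        intro q hq
        have hqm := (PySem.Set.mem_ofList ps q).1 hq
        simp only [beq_iff_eq]
        intro e
        exact ho (e ▸ List.mem_map_of_mem hqm)
      show outerOf ps ++ _ = outerOf (ps ++ [p])
      unfold outerOf
      rw [List.map_append, List.map_cons, List.map_nil, ofList_append_not_mem _ _ ho,
        List.map_append]
      congr 1
      · refine List.map_congr_left (fun o' ho' => ?_)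
        have hne : p.1 ≠ o' := by
          rintro rfl
          exact ho (by simpa [PySem.Set.mem_ofList] using ho')
        rw [innerOf_append_of_ne ps p o' hne]
      · rw [List.map_cons, List.map_nil]
        rw [innerOf_append_self_of_not_mem ps p hp, hinner_nil, List.nil_append]
        rfl

-- canonical item lists read off a counter's item list (B's regroup input)
def innerR (its : List ((String × String) × Int)) (o : String) : List (String × Int) :=
  (its.filter (fun q => q.1.1 == o)).map (fun q => (q.1.2, q.2))

def outerR (its : List ((String × String) × Int)) : List (String × PySem.Dict String Int) :=
  (PySem.Set.ofList (its.map (fun q => q.1.1))).map (fun o => (o, PySem.Dict.mk (innerR its o)))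

theorem innerR_append_of_ne (its : List ((String × String) × Int)) (x : (String × String) × Int)
    (o' : String) (h : x.1.1 ≠ o') : innerR (its ++ [x]) o' = innerR its o' := by
  unfold innerR
  rw [List.filter_append]
  have : [x].filter (fun q => q.1.1 == o') = [] := by simp [h]
  rw [this, List.append_nil]

theorem innerR_append_self (its : List ((String × String) × Int)) (x : (String × String) × Int) :
    innerR (its ++ [x]) x.1.1 = innerR its x.1.1 ++ [(x.1.2, x.2)] := by
  unfold innerR
  rw [List.filter_append]
  have : [x].filter (fun q => q.1.1 == x.1.1) = [x] := by simp
  rw [this, List.map_append]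
  rfl

theorem keys_outerR (its : List ((String × String) × Int)) :
    (outerR its).map Prod.fst = PySem.Set.ofList (its.map (fun q => q.1.1)) := by
  simp [outerR, List.map_map, Function.comp_def]

-- B's regroup loop, characterized: on a distinct-key item list it builds the same
-- canonical grouped item lists.
theorem RChar (its : List ((String × String) × Int)) (hnd : (its.map Prod.fst).Nodup) :
    (List.foldl stepB PySem.Dict.empty its).items = outerR its := by
  induction its using List.reverseRecOn with
  | nil => rfl
  | append_singleton its x ih =>
    rw [List.map_append] at hnd
    have hnd' : (its.map Prod.fst).Nodup := (List.nodup_append.1 hnd).1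
    have hxf : x.1 ∉ its.map Prod.fst := by
      have hdis := (List.nodup_append.1 hnd).2.2
      intro hc
      exact hdis x.1 hc x.1 (by simp) rfl
    have ih' := ih hnd'
    rw [List.foldl_append, List.foldl_cons, List.foldl_nil]
    have hd : List.foldl stepB PySem.Dict.empty its = PySem.Dict.mk (outerR its) :=
      PySem.Dict.ext ih'
    rw [hd]
    have hndk : (PySem.Dict.mk (outerR its)).keys.Nodup := by
      show ((outerR its).map Prod.fst).Nodup
      rw [keys_outerR]; exact PySem.Set.nodup_ofList _
    by_cases ho : x.1.1 ∈ its.map (fun q => q.1.1)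
    · -- order present
      have hmem : (x.1.1, PySem.Dict.mk (innerR its x.1.1)) ∈ (PySem.Dict.mk (outerR its)).items := by
        show _ ∈ outerR its
        exact List.mem_map_of_mem ((PySem.Set.mem_ofList _ _).2 ho)
      have hget : (PySem.Dict.mk (outerR its)).get? x.1.1 = some (PySem.Dict.mk (innerR its x.1.1)) :=
        PySem.Dict.get?_of_mem_items _ hmem hndk
      have hcon : (PySem.Dict.mk (outerR its)).contains x.1.1 = true := by
        rw [PySem.Dict.contains_eq_isSome_get?, hget]; rfl
      have hgetD : (PySem.Dict.mk (outerR its)).getD x.1.1 PySem.Dict.empty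
          = PySem.Dict.mk (innerR its x.1.1) :=
        PySem.Dict.getD_of_mem_items _ hmem hndk _
      have hcon2 : (PySem.Dict.mk (innerR its x.1.1)).contains x.1.2 = false := by
        rw [PySem.Dict.contains_eq_isSome_get?,
          (PySem.Dict.get?_eq_none_iff_not_mem_keys _ _).2 ?_]
        · rfl
        · show x.1.2 ∉ (innerR its x.1.1).map Prod.fst
          intro hm
          rw [innerR, List.map_map] at hm
          obtain ⟨q, hqf, hq2⟩ := List.mem_map.1 hm
          rcases List.mem_filter.1 hqf with ⟨hq1, hq1'⟩
          refine hxf ?_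
          have : q.1 = x.1 := Prod.ext (by simpa using hq1') (by simpa using hq2)
          exact this ▸ List.mem_map_of_mem hq1
      show (stepB (PySem.Dict.mk (outerR its)) x).items = _
      simp only [stepB, hcon, if_true, hgetD]
      rw [PySem.Dict.items_insert_of_contains _ _ hcon]
      unfold outerR
      rw [List.map_append, List.map_cons, List.map_nil, ofList_append_mem _ _ ho, List.map_map]
      refine List.map_congr_left (fun o' ho' => ?_)
      by_cases he : o' = x.1.1
      · subst he
        simp only [Function.comp_def, beq_self_eq_true, if_pos]
        refine Prod.ext rfl (PySem.Dict.ext ?_)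
        rw [PySem.Dict.items_insert_of_not_contains _ _ hcon2]
        show innerR its x.1.1 ++ [(x.1.2, x.2)] = innerR (its ++ [x]) x.1.1
        rw [innerR_append_self]
      · simp only [Function.comp_def]
        rw [if_neg (by simpa using he)]
        rw [innerR_append_of_ne its x o' (fun e => he (e.symm))]
    · -- fresh order
      have hget : (PySem.Dict.mk (outerR its)).get? x.1.1 = none := by
        rw [PySem.Dict.get?_eq_none_iff_not_mem_keys]
        show x.1.1 ∉ (outerR its).map Prod.fst
        rw [keys_outerR]
        simpa [PySem.Set.mem_ofList] using ho
      have hcon : (PySem.Dict.mk (outerR its)).contains x.1.1 = false := by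
        rw [PySem.Dict.contains_eq_isSome_get?, hget]; rfl
      have hinner_nil : innerR its x.1.1 = [] := by
        rw [innerR, List.filter_eq_nil_iff.2, List.map_nil]
        intro q hq
        simp only [beq_iff_eq]
        intro e
        exact ho (e ▸ List.mem_map_of_mem hq)
      show (stepB (PySem.Dict.mk (outerR its)) x).items = _
      simp only [stepB, hcon, if_false, Bool.false_eq_true]
      rw [PySem.Dict.getD_insert_self, PySem.Dict.insert_insert_self]
      rw [PySem.Dict.items_insert_of_not_contains _ _ hcon]
      unfold outerR
      rw [List.map_append, List.map_cons, List.map_nil, ofList_append_not_mem _ _ ho,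
        List.map_append, List.map_cons, List.map_nil]
      congr 1
      · refine List.map_congr_left (fun o' ho' => ?_)
        have hne : x.1.1 ≠ o' := by
          rintro rfl
          exact ho (by simpa [PySem.Set.mem_ofList] using ho')
        rw [innerR_append_of_ne its x o' hne]
      · rw [innerR_append_self, hinner_nil, List.nil_append]
        rfl

theorem ofList_map_ofList2 {α β : Type} [BEq α] [LawfulBEq α] [BEq β] [LawfulBEq β]
    (l : List α) (f : α → β) :
    PySem.Set.ofList ((PySem.Set.ofList l).map f) = PySem.Set.ofList (l.map f) := by
  induction l using List.reverseRecOn with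
  | nil => rfl
  | append_singleton l a ih =>
    by_cases h : a ∈ l
    · rw [ofList_append_mem l a h, List.map_append]
      simp only [List.map_cons, List.map_nil]
      rw [ofList_append_mem (l.map f) (f a) (List.mem_map_of_mem h), ih]
    · rw [ofList_append_not_mem l a h, List.map_append, List.map_append]
      simp only [List.map_cons, List.map_nil]
      have hm : f a ∈ (PySem.Set.ofList l).map f ↔ f a ∈ l.map f := by
        simp [List.mem_map, PySem.Set.mem_ofList]
      by_cases hf : f a ∈ l.map f
      · rw [ofList_append_mem _ _ (hm.2 hf), ih, ofList_append_mem _ _ hf]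
      · rw [ofList_append_not_mem _ _ (fun c => hf (hm.1 c)), ih, ofList_append_not_mem _ _ hf]

-- the canonical list read off Counter(pairs) IS the canonical list of the pair list
theorem outerR_counter (ps : List (String × String)) :
    outerR ((PySem.Dict.counter ps).items) = outerOf ps := by
  rw [PySem.Dict.items_counter]
  unfold outerR outerOf
  rw [List.map_map]
  have h1 : PySem.Set.ofList
      ((PySem.Set.ofList ps).map ((fun q => q.1.1) ∘ fun k => (k, (List.count k ps : Int))))
      = PySem.Set.ofList (ps.map Prod.fst) := by
    rw [show ((fun (q : (String × String) × Int) => q.1.1) ∘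
        fun k => (k, (List.count k ps : Int))) = Prod.fst from rfl]
    exact ofList_map_ofList2 ps Prod.fst
  rw [h1]
  refine List.map_congr_left (fun o ho => ?_)
  refine Prod.ext rfl (PySem.Dict.ext ?_)
  show innerR ((PySem.Set.ofList ps).map (fun k => (k, (List.count k ps : Int)))) o = innerOf ps o
  unfold innerR innerOf
  rw [List.filter_map, List.map_map]
  rfl

theorem counter_items_nodup_fst (ps : List (String × String)) :
    (((PySem.Dict.counter ps).items).map Prod.fst).Nodup := by
  rw [PySem.Dict.items_counter, List.map_map]
  rw [show (Prod.fst ∘ fun (k : String × String) => (k, (List.count k ps : Int))) = id from rfl]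
  rw [List.map_id]
  exact PySem.Set.nodup_ofList ps

theorem main_items (ps : List (String × String)) :
    (List.foldl stepA PySem.Dict.empty ps).items
      = (List.foldl stepB PySem.Dict.empty ((PySem.Dict.counter ps).items)).items := by
  rw [AChar, RChar _ (counter_items_nodup_fst ps), outerR_counter]

theorem bridge_A (data : List (String × (String × String) × (String × String))) :
    aggregate_shipments data =
      ((((PySem.Dict.ofList data).values).map (fun s => (s.1.2, s.2.2))).foldl stepA
          PySem.Dict.empty).items.map (fun p => (p.1, p.2.items)) := by
  simp [aggregate_shipments, stepA, List.foldl_map]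

theorem bridge_B (data : List (String × (String × String) × (String × String))) :
    aggregate_shipments_alt data =
      (((PySem.Dict.counter (((PySem.Dict.ofList data).values).map
            (fun s => (s.1.2, s.2.2)))).items).foldl stepB PySem.Dict.empty).items.map
        (fun p => (p.1, p.2.items)) := rfl

-- ===== VERDICT (by name: the statement is the Claim_ definition above) =====
theorem aggregate_shipments_spec : Claim_equal_aggregate_shipments := by
  intro data _
  show aggregate_shipments data = aggregate_shipments_alt data
  rw [bridge_A, bridge_B, main_items]
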